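-- pv_equiv track=rewrite | github.com/mikwit/adventofcode | lwhite17/2020/days/Day6.py | every_yes
-- ===== SOURCE A (Python) =====
-- def every_yes(data):
--     count_total = 0
--
--     for group in data:
--         if '\n' in group:
--             common_chars = []
--             responses = group.split('\n')
--             responses = [list(response) for response in responses if len(response) > 0]
--             first = responses[0]
--
--             for char in first:
--                 in_responses = [char in response for response in responses[1:]]
--                 # char must be in each response; should be no False values
--                 if False in in_responses:
--                     pass
--                 else:
--                     common_chars.append(char)
--         else:
--             common_chars = group
--         count_total += len(common_chars)
--     return count_total
-- ===== SOURCE B (Python) =====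
-- def every_yes(data):
--     total = 0
--     for group in data:
--         if '\n' in group:
--             parts = [p for p in group.split('\n') if p]
--             common = set(parts[0])
--             for p in parts[1:]:
--                 common &= set(p)
--             total += sum(c in common for c in parts[0])
--         else:
--             total += len(group)
--     return total
-- ===== Notes on version B (the rewrite author's own statement) =====
-- stated objective: alternative
-- what changed: Instead of scanning every other response once per character of the first response, B builds the intersection of the responses' character sets once per group and then counts the first response's characters that lie in it (duplicates kept); it trades A's per-character membership scans for one set intersection per group.
import Mathlib
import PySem

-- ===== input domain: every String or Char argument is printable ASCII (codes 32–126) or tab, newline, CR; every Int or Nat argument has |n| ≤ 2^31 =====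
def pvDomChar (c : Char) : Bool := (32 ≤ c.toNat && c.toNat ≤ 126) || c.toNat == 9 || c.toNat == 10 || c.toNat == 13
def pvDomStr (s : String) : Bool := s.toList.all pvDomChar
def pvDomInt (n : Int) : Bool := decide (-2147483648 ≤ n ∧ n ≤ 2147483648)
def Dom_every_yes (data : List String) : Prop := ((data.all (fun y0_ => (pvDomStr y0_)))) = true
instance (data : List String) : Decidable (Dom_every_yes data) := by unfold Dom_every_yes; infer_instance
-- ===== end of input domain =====

-- B replaces A's per-character scan of all other responses by one set intersection per group
-- (a different algorithm, not measured faster on the generated inputs); return-value equivalence only.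

-- ===== PORT A =====
def every_yes (data : List String) : Int :=
  data.foldl (fun count_total group =>
    let common_chars : List Char :=
      if PySem.Chars.isIn ['\n'] group.toList then
        let responses :=
          (PySem.Chars.splitOn group.toList ['\n']).filter (fun response => decide (0 < response.length))
        let first := PySem.List.pyGetD responses 0 []            -- responses[0]; IndexError excluded by Pre_
        first.foldl (fun common_chars char =>
          let in_responses := (responses.drop 1).map (fun response => response.contains char)
          if in_responses.contains false then common_chars else common_chars ++ [char]) []
      else group.toList
    count_total + (common_chars.length : Int)) 0

-- ===== PORT B =====
def every_yes_alt (data : List String) : Int :=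
  data.foldl (fun total group =>
    if PySem.Chars.isIn ['\n'] group.toList then
      let parts := (PySem.Chars.splitOn group.toList ['\n']).filter (fun p => !p.isEmpty)
      let first := PySem.List.pyGetD parts 0 []                  -- parts[0]; IndexError excluded by Pre_
      let common := (parts.drop 1).foldl
        (fun c p => PySem.Set.inter c (PySem.Set.ofList p)) (PySem.Set.ofList first)
      total + (first.countP (fun c => common.contains c) : Int)
    else total + PySem.Str.len group) 0

-- ===== PRECONDITION & SPEC =====
-- Pre_ excludes groups that contain '\n' but whose lines are all empty (groups made only of
-- newlines): there A (and B alike) raises IndexError on responses[0] of an empty list.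
def Pre_every_yes (data : List String) : Prop :=
  ∀ s ∈ data, PySem.Chars.isIn ['\n'] s.toList = true →
    (PySem.Chars.splitOn s.toList ['\n']).any (fun p => !p.isEmpty) = true
instance (data : List String) : Decidable (Pre_every_yes data) := by unfold Pre_every_yes; infer_instance

def pvWitness_every_yes : List String := ["ab\nbc\nb", "xyz"]

def Spec_every_yes (data : List String) (out : Int) : Prop := out = every_yes_alt data
instance (data : List String) (out : Int) : Decidable (Spec_every_yes data out) := by unfold Spec_every_yes; infer_instance

-- ===== CLAIM (what is proved, stated in full; the proofs are below) =====
def Claim_equal_every_yes : Prop := ∀ (data : List String), Dom_every_yes data → Pre_every_yes data → Spec_every_yes data (every_yes data)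

-- ===== LEMMAS AND PROOFS =====

-- membership in B's iterated intersection
lemma mem_foldl_inter (rest : List (List Char)) (init : List Char) (x : Char) :
    x ∈ rest.foldl (fun c p => PySem.Set.inter c (PySem.Set.ofList p)) init ↔
      x ∈ init ∧ ∀ p ∈ rest, x ∈ p := by
  induction rest generalizing init with
  | nil => simp
  | cons p rest ih =>
      simp only [List.foldl_cons, ih, PySem.Set.mem_inter, PySem.Set.mem_ofList, List.mem_cons]
      constructor
      · rintro ⟨⟨hx, hp⟩, hall⟩
        exact ⟨hx, fun q hq => hq.elim (fun h => h ▸ hp) (hall q)⟩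
      · rintro ⟨hx, hall⟩
        exact ⟨⟨hx, hall p (Or.inl rfl)⟩, fun q hq => hall q (Or.inr hq)⟩

-- A's inner loop keeps exactly the characters of `first` contained in every later response
lemma a_loop_len (first : List Char) (rest : List (List Char)) :
    (first.foldl (fun cc ch =>
        if (rest.map (fun r => r.contains ch)).contains false then cc else cc ++ [ch]) []).length
      = first.countP (fun ch => rest.all (fun r => r.contains ch)) := by
  have hf : (fun (cc : List Char) (ch : Char) =>
        if (rest.map (fun r => r.contains ch)).contains false then cc else cc ++ [ch])
      = (fun cc ch => if rest.all (fun r => r.contains ch) then cc ++ [ch] else cc) := by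
    funext cc ch
    by_cases h : ∀ x ∈ rest, ch ∈ x
    · have ht : rest.all (fun r => r.contains ch) = true := by
        rw [List.all_eq_true]; intro r hr; simpa using h r hr
      have hc : ((rest.map (fun r => r.contains ch)).contains false) = false := by
        rw [Bool.eq_false_iff]
        intro hT
        simp only [List.contains_eq_mem, List.mem_map, decide_eq_true_eq] at hT
        obtain ⟨r, hr, he⟩ := hT
        exact absurd (h r hr) (by simpa using he.symm)
      rw [if_neg (by simpa using h), if_pos ht]
    · have hr' := h
      rw [not_forall] at hr'
      obtain ⟨r, hr⟩ := hr'
      rw [Classical.not_imp] at hr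
      obtain ⟨hrm, hrn⟩ := hr
      have ht : rest.all (fun r => r.contains ch) = false := by
        rw [Bool.eq_false_iff]
        intro hT
        rw [List.all_eq_true] at hT
        exact hrn (by simpa using hT r hrm)
      have hc : ((rest.map (fun r => r.contains ch)).contains false) = true := by
        simp only [List.contains_eq_mem, List.mem_map, decide_eq_true_eq]
        exact ⟨r, hrm, by simpa using hrn⟩
      have hex : ∃ x ∈ rest, ch ∉ x := ⟨r, hrm, hrn⟩
      rw [if_pos hc, if_neg (by simpa using hex)]
  rw [hf, PySem.List.foldl_append_if_eq_filter]
  simp [List.countP_eq_length_filter]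

-- the two filters keep the same lines
lemma filter_lines_eq (l : List (List Char)) :
    l.filter (fun response => decide (0 < response.length)) = l.filter (fun p => !p.isEmpty) := by
  apply List.filter_congr
  intro x _
  cases x <;> simp

-- per-group contributions agree
lemma step_eq (g : String)
    (hg : PySem.Chars.isIn ['\n'] g.toList = true →
      (PySem.Chars.splitOn g.toList ['\n']).any (fun p => !p.isEmpty) = true) :
    (let common_chars : List Char :=
      if PySem.Chars.isIn ['\n'] g.toList then
        let responses :=
          (PySem.Chars.splitOn g.toList ['\n']).filter (fun response => decide (0 < response.length))
        let first := PySem.List.pyGetD responses 0 []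
        first.foldl (fun common_chars char =>
          let in_responses := (responses.drop 1).map (fun response => response.contains char)
          if in_responses.contains false then common_chars else common_chars ++ [char]) []
      else g.toList
     (common_chars.length : Int))
    = (if PySem.Chars.isIn ['\n'] g.toList then
        let parts := (PySem.Chars.splitOn g.toList ['\n']).filter (fun p => !p.isEmpty)
        let first := PySem.List.pyGetD parts 0 []
        let common := (parts.drop 1).foldl
          (fun c p => PySem.Set.inter c (PySem.Set.ofList p)) (PySem.Set.ofList first)
        ((first.countP (fun c => common.contains c) : Int))
      else PySem.Str.len g) := by
  by_cases hin : PySem.Chars.isIn ['\n'] g.toList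
  · simp only [hin, if_pos, filter_lines_eq]
    set parts := (PySem.Chars.splitOn g.toList ['\n']).filter (fun p => !p.isEmpty) with hparts
    have hne : parts ≠ [] := by
      intro h
      have := hg hin
      rw [List.any_eq_true] at this
      obtain ⟨p, hp, hpe⟩ := this
      have : p ∈ parts := by
        rw [hparts, List.mem_filter]; exact ⟨hp, hpe⟩
      simp [h] at this
    obtain ⟨f, rest, hfr⟩ := List.exists_cons_of_ne_nil hne
    rw [hfr]
    simp only [PySem.List.pyGetD_zero_cons, List.drop_one, List.tail_cons]
    rw [a_loop_len]
    congr 1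
    apply List.countP_congr
    intro ch hch
    have hmem : ch ∈ PySem.Set.ofList f := by rw [PySem.Set.mem_ofList]; exact hch
    by_cases hall : ∀ p ∈ rest, ch ∈ p
    · have h1 : rest.all (fun r => r.contains ch) = true := by
        simp only [List.all_eq_true]
        intro r hr; simpa using hall r hr
      have h2 : (rest.foldl (fun c p => PySem.Set.inter c (PySem.Set.ofList p))
          (PySem.Set.ofList f)).contains ch = true := by
        have := (mem_foldl_inter rest (PySem.Set.ofList f) ch).mpr
          ⟨by simpa [PySem.Set.mem_ofList] using hmem, hall⟩
        simpa using this
      rw [h1, h2]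
    · rw [not_forall] at hall
      obtain ⟨p, hp'⟩ := hall
      rw [Classical.not_imp] at hp'
      obtain ⟨hp, hnp⟩ := hp'
      have h1 : rest.all (fun r => r.contains ch) = false := by
        rw [Bool.eq_false_iff]
        intro hT
        rw [List.all_eq_true] at hT
        exact hnp (by simpa using hT p hp)
      have h2 : (rest.foldl (fun c p => PySem.Set.inter c (PySem.Set.ofList p))
          (PySem.Set.ofList f)).contains ch = false := by
        rw [Bool.eq_false_iff]
        intro hT
        have : ch ∈ rest.foldl (fun c p => PySem.Set.inter c (PySem.Set.ofList p))
            (PySem.Set.ofList f) := by simpa using hT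
        exact hnp (((mem_foldl_inter rest _ ch).mp this).2 p hp)
      rw [h1, h2]
  · simp only [if_neg hin]
    simp [PySem.Str.len]

-- ===== VERDICT (by name: the statement is the Claim_ definition above) =====
theorem every_yes_spec : Claim_equal_every_yes := by
  intro data _ hpre
  unfold Spec_every_yes every_yes every_yes_alt
  apply List.foldl_ext
  intro acc g hgmem
  have h := step_eq g (hpre g hgmem)
  dsimp only at h ⊢
  rw [h]
  cases hin : PySem.Chars.isIn ['\n'] g.toList <;> simp
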